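-- pv_equiv track=rewrite | github.com/mondal-ayush/routing_on_biochip | Grou A08/code/GeneticSqGrid.py | evaluate
-- ===== SOURCE A (Python) =====
-- def evaluate(individual, grid, start, end, n, m):
--     # Start from the start point
--     x, y = start
--     fitness = 0
--
--     # Keep track of the visited cells
--     visited = set()
--
--     # Make each move in the individual's sequence
--     for move in individual:
--         if move == 'left' and y > 0 and grid[x][y-1] == 0 and (x, y-1) not in visited:
--             y -= 1
--         elif move == 'right' and y < m-1 and grid[x][y+1] == 0 and (x, y+1) not in visited:
--             y += 1
--         elif move == 'top' and x > 0 and grid[x-1][y] == 0 and (x-1, y) not in visited: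
--             x -= 1
--         elif move == 'bottom' and x < n-1 and grid[x+1][y] == 0 and (x+1, y) not in visited:
--             x += 1
--
--         # Add the current cell to the visited cells
--         visited.add((x, y))
--
--         # Calculate the Manhattan distance from the end point
--         fitness += abs(x - end[0]) + abs(y - end[1])
--
--         # If the end point is reached, break the loop
--         if (x, y) == end:
--             break
--
--     return fitness
-- ===== SOURCE B (Python) =====
-- # Staged, run-length re-implementation: one pass compresses the walk into runs
-- # (position, number of consecutive iterations spent there), truncated on reaching
-- # the end; fitness is then a separate weighted sum dist(pos) * count over the runs.
-- # The four-way branch becomes a delta-table lookup with one unified guard.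
--
-- _DELTAS = {'left': (0, -1), 'right': (0, 1), 'top': (-1, 0), 'bottom': (1, 0)}
--
-- def _runs(moves, grid, start, end, n, m):
--     pos = start
--     seen = set()
--     runs = []
--     cnt = 0
--     for mv in moves:
--         d = _DELTAS.get(mv)
--         nxt = pos
--         if d is not None:
--             nx, ny = pos[0] + d[0], pos[1] + d[1]
--             if 0 <= nx < n and 0 <= ny < m and grid[nx][ny] == 0 and (nx, ny) not in seen:
--                 nxt = (nx, ny)
--         if nxt != pos:
--             if cnt:
--                 runs.append((pos, cnt))
--             pos = nxt
--             cnt = 1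
--         else:
--             cnt += 1
--         seen.add(pos)
--         if pos == end:
--             break
--     if cnt:
--         runs.append((pos, cnt))
--     return runs
--
-- def evaluate(individual, grid, start, end, n, m):
--     return sum((abs(px - end[0]) + abs(py - end[1])) * c
--                for (px, py), c in _runs(individual, grid, start, end, n, m))
-- ===== Notes on version B (the rewrite author's own statement) =====
-- stated objective: alternative
-- what changed: A's fused loop adds the Manhattan distance once per iteration; B instead builds a run-length-encoded trajectory (distinct position, number of consecutive iterations spent there, via a delta-table lookup with one unified guard instead of the if/elif chain) and computes fitness in a separate pass as the weighted sum distance*count over the runs. Pre_ admits inputs whose start lies inside the n-by-m board with the grid covering at least that board, plus any input whose move sequence contains no move that could fire; …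
-- outside the precondition, e.g. on evaluate(['left'], [[0, 0]], (-1, 1), (0, 0), 1, 2): A returns 1, B returns 2
import Mathlib
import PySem

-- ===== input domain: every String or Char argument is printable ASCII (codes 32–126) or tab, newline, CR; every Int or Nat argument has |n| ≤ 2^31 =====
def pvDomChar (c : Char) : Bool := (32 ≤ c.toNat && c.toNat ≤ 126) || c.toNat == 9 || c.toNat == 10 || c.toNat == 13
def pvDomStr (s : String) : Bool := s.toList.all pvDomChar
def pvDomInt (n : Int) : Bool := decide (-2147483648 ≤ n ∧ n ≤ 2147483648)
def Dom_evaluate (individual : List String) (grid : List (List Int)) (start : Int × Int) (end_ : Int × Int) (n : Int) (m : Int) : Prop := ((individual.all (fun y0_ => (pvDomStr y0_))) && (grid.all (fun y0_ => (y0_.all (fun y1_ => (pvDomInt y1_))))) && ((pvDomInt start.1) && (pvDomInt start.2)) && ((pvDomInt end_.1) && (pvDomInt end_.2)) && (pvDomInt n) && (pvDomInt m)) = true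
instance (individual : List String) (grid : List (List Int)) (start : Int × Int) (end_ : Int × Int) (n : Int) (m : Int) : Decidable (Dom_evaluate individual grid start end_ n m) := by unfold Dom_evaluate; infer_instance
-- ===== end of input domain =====

-- B replaces A's fused per-iteration accumulation by two stages: one pass compresses the
-- walk into run-length runs (position, consecutive-iteration count; delta table instead of
-- the if/elif chain), and fitness is a separate weighted sum distance*count over the runs.

-- grid[i][j], total form: exact where both indexes are in range (guaranteed by Pre_)
def pvGridAt (grid : List (List Int)) (i j : Int) : Int :=
  ((PySem.List.pyGet? grid i).bind (fun row => PySem.List.pyGet? row j)).getD 0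

-- ===== PORT A =====
-- the body of A's if/elif chain: the position after one move
def pvStepA (grid : List (List Int)) (n m : Int) (move : String) (x y : Int)
    (visited : PySem.Set (Int × Int)) : Int × Int :=
  if move = "left" ∧ 0 < y ∧ pvGridAt grid x (y - 1) = 0 ∧ (x, y - 1) ∉ visited then (x, y - 1)
  else if move = "right" ∧ y < m - 1 ∧ pvGridAt grid x (y + 1) = 0 ∧ (x, y + 1) ∉ visited then (x, y + 1)
  else if move = "top" ∧ 0 < x ∧ pvGridAt grid (x - 1) y = 0 ∧ (x - 1, y) ∉ visited then (x - 1, y)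
  else if move = "bottom" ∧ x < n - 1 ∧ pvGridAt grid (x + 1) y = 0 ∧ (x + 1, y) ∉ visited then (x + 1, y)
  else (x, y)

def pvLoopA (grid : List (List Int)) (end_ : Int × Int) (n m : Int) :
    List String → Int → Int → PySem.Set (Int × Int) → Int → Int
  | [], _, _, _, fitness => fitness
  | move :: rest, x, y, visited, fitness =>
    let p := pvStepA grid n m move x y visited
    let visited' := PySem.Set.add visited p
    let fitness' := fitness + |p.1 - end_.1| + |p.2 - end_.2|
    if p = end_ then fitness' else pvLoopA grid end_ n m rest p.1 p.2 visited' fitness'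

def evaluate (individual : List String) (grid : List (List Int)) (start : Int × Int) (end_ : Int × Int) (n : Int) (m : Int) : Int :=
  pvLoopA grid end_ n m individual start.1 start.2 (PySem.Set.empty) 0

-- ===== PORT B =====
def pvDeltas : PySem.Dict String (Int × Int) :=
  ((((PySem.Dict.empty).insert "left" (0, -1)).insert "right" (0, 1)).insert "top" (-1, 0)).insert "bottom" (1, 0)

-- the candidate cell for one move: delta lookup (unknown move = stay), one unified guard
def pvStepB (grid : List (List Int)) (n m : Int) (move : String) (x y : Int)
    (seen : PySem.Set (Int × Int)) : Int × Int :=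
  match PySem.Dict.get? pvDeltas move with
  | none => (x, y)
  | some d =>
    let nx := x + d.1
    let ny := y + d.2
    if 0 ≤ nx ∧ nx < n ∧ 0 ≤ ny ∧ ny < m ∧ pvGridAt grid nx ny = 0 ∧ (nx, ny) ∉ seen
    then (nx, ny) else (x, y)

-- _runs: the walk compressed into (position, consecutive-iteration count) runs,
-- truncated when the end is reached; `runs` is the accumulator, `cnt` the open run
def pvRunsB (grid : List (List Int)) (end_ : Int × Int) (n m : Int) :
    List String → (Int × Int) → PySem.Set (Int × Int) → Int → List ((Int × Int) × Int) →
      List ((Int × Int) × Int)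
  | [], pos, _, cnt, runs => runs ++ (if cnt ≠ 0 then [(pos, cnt)] else [])
  | mv :: rest, pos, seen, cnt, runs =>
    let nxt := pvStepB grid n m mv pos.1 pos.2 seen
    let pos' := if nxt ≠ pos then nxt else pos
    let cnt' := if nxt ≠ pos then 1 else cnt + 1
    let runs' := if nxt ≠ pos then runs ++ (if cnt ≠ 0 then [(pos, cnt)] else []) else runs
    let seen' := PySem.Set.add seen pos'
    if pos' = end_ then runs' ++ (if cnt' ≠ 0 then [(pos', cnt')] else [])
    else pvRunsB grid end_ n m rest pos' seen' cnt' runs'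

-- the weighted sum distance * count over the runs (Python's sum over a generator)
def pvSumRuns (end_ : Int × Int) : List ((Int × Int) × Int) → Int
  | [] => 0
  | (p, c) :: r => (|p.1 - end_.1| + |p.2 - end_.2|) * c + pvSumRuns end_ r

def evaluate_alt (individual : List String) (grid : List (List Int)) (start : Int × Int) (end_ : Int × Int) (n : Int) (m : Int) : Int :=
  pvSumRuns end_ (pvRunsB grid end_ n m individual start (PySem.Set.empty) 0 [])

-- ===== PRECONDITION & SPEC =====
-- Pre_ admits inputs whose start lies inside the n-by-m board with the grid covering at least that board
-- (then every access A makes is in range), and inputs on which every recognized move occurring in the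
-- sequence is blocked by its boundary check at the start (then neither program ever moves or touches the
-- grid); outside Pre_, A may raise IndexError or return a value produced by negative-index wraparound.
def Pre_evaluate (individual : List String) (grid : List (List Int)) (start : Int × Int) (end_ : Int × Int) (n : Int) (m : Int) : Prop :=
  (0 ≤ start.1 ∧ start.1 < n ∧ 0 ≤ start.2 ∧ start.2 < m ∧
   n ≤ (grid.length : Int) ∧ (∀ row ∈ grid, m ≤ (row.length : Int))) ∨
  (("left" ∉ individual ∨ start.2 ≤ 0) ∧ ("right" ∉ individual ∨ m - 1 ≤ start.2) ∧
   ("top" ∉ individual ∨ start.1 ≤ 0) ∧ ("bottom" ∉ individual ∨ n - 1 ≤ start.1))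
instance (individual : List String) (grid : List (List Int)) (start : Int × Int) (end_ : Int × Int) (n : Int) (m : Int) : Decidable (Pre_evaluate individual grid start end_ n m) := by unfold Pre_evaluate; infer_instance

def pvWitness_evaluate : List String × List (List Int) × (Int × Int) × (Int × Int) × Int × Int :=
  (["right", "bottom"], [[0, 0], [0, 0]], (0, 0), (1, 1), 2, 2)

def Spec_evaluate (individual : List String) (grid : List (List Int)) (start : Int × Int) (end_ : Int × Int) (n : Int) (m : Int) (out : Int) : Prop := out = evaluate_alt individual grid start end_ n m
instance (individual : List String) (grid : List (List Int)) (start : Int × Int) (end_ : Int × Int) (n : Int) (m : Int) (out : Int) : Decidable (Spec_evaluate individual grid start end_ n m out) := by unfold Spec_evaluate; infer_instance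

-- ===== CLAIM (what is proved, stated in full; the proofs are below) =====
def Claim_equal_evaluate : Prop := ∀ (individual : List String) (grid : List (List Int)) (start : Int × Int) (end_ : Int × Int) (n : Int) (m : Int), Dom_evaluate individual grid start end_ n m → Pre_evaluate individual grid start end_ n m → Spec_evaluate individual grid start end_ n m (evaluate individual grid start end_ n m)

-- ===== LEMMAS AND PROOFS =====

-- A's step and B's candidate agree on the same visited set, when the cell is on the board
theorem pvStep_eq (grid : List (List Int)) (n m : Int) (move : String) (x y : Int)
    (visited : PySem.Set (Int × Int))
    (hx0 : 0 ≤ x) (hxn : x < n) (hy0 : 0 ≤ y) (hym : y < m) :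
    pvStepA grid n m move x y visited = pvStepB grid n m move x y visited := by
  rw [pvStepA, pvStepB]
  by_cases h1 : move = "left"
  · subst h1
    rw [show PySem.Dict.get? pvDeltas "left" = some ((0 : Int), (-1 : Int)) from by decide]
    dsimp only
    simp only [show x + (0:Int) = x from by ring, show y + (-1:Int) = y - 1 from by ring]
    by_cases hC : pvGridAt grid x (y - 1) = 0 <;> by_cases hV : (x, y - 1) ∈ visited <;>
      split_ifs <;> simp_all <;> omega
  · by_cases h2 : move = "right"
    · subst h2
      rw [show PySem.Dict.get? pvDeltas "right" = some ((0 : Int), (1 : Int)) from by decide]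
      dsimp only
      simp only [show x + (0:Int) = x from by ring]
      by_cases hC : pvGridAt grid x (y + 1) = 0 <;> by_cases hV : (x, y + 1) ∈ visited <;>
        split_ifs <;> simp_all <;> omega
    · by_cases h3 : move = "top"
      · subst h3
        rw [show PySem.Dict.get? pvDeltas "top" = some ((-1 : Int), (0 : Int)) from by decide]
        dsimp only
        simp only [show x + (-1:Int) = x - 1 from by ring, show y + (0:Int) = y from by ring]
        by_cases hC : pvGridAt grid (x - 1) y = 0 <;> by_cases hV : (x - 1, y) ∈ visited <;>
          split_ifs <;> simp_all <;> omega
      · by_cases h4 : move = "bottom"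
        · subst h4
          rw [show PySem.Dict.get? pvDeltas "bottom" = some ((1 : Int), (0 : Int)) from by decide]
          dsimp only
          simp only [show y + (0:Int) = y from by ring]
          by_cases hC : pvGridAt grid (x + 1) y = 0 <;> by_cases hV : (x + 1, y) ∈ visited <;>
            split_ifs <;> simp_all <;> omega
        · rw [show PySem.Dict.get? pvDeltas move = none from by
                simp [pvDeltas, PySem.Dict.get?_insert, h1, h2, h3, h4, PySem.Dict.get?_empty]]
          rw [if_neg (fun h => h1 h.1), if_neg (fun h => h2 h.1),
              if_neg (fun h => h3 h.1), if_neg (fun h => h4 h.1)]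

-- a move that is unrecognized or blocked by its boundary check is a no-op for both steps
theorem pvStep_eq_dead (grid : List (List Int)) (n m : Int) (move : String) (x y : Int)
    (visited : PySem.Set (Int × Int))
    (hL : move = "left" → y ≤ 0) (hR : move = "right" → m - 1 ≤ y)
    (hT : move = "top" → x ≤ 0) (hB : move = "bottom" → n - 1 ≤ x) :
    pvStepA grid n m move x y visited = (x, y) ∧ pvStepB grid n m move x y visited = (x, y) := by
  by_cases h1 : move = "left"
  · subst h1
    have hy := hL rfl
    refine ⟨?_, ?_⟩
    · rw [pvStepA, if_neg (fun h => absurd h.2.1 (by omega)), if_neg (fun h => by simp at h),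
          if_neg (fun h => by simp at h), if_neg (fun h => by simp at h)]
    · rw [pvStepB, show PySem.Dict.get? pvDeltas "left" = some ((0 : Int), (-1 : Int)) from by decide]
      dsimp only
      rw [if_neg (fun h => absurd h.2.2.1 (by omega))]
  · by_cases h2 : move = "right"
    · subst h2
      have hy := hR rfl
      refine ⟨?_, ?_⟩
      · rw [pvStepA, if_neg (fun h => by simp at h), if_neg (fun h => absurd h.2.1 (by omega)),
            if_neg (fun h => by simp at h), if_neg (fun h => by simp at h)]
      · rw [pvStepB, show PySem.Dict.get? pvDeltas "right" = some ((0 : Int), (1 : Int)) from by decide]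
        dsimp only
        rw [if_neg (fun h => absurd h.2.2.2.1 (by omega))]
    · by_cases h3 : move = "top"
      · subst h3
        have hx := hT rfl
        refine ⟨?_, ?_⟩
        · rw [pvStepA, if_neg (fun h => by simp at h), if_neg (fun h => by simp at h),
              if_neg (fun h => absurd h.2.1 (by omega)), if_neg (fun h => by simp at h)]
        · rw [pvStepB, show PySem.Dict.get? pvDeltas "top" = some ((-1 : Int), (0 : Int)) from by decide]
          dsimp only
          rw [if_neg (fun h => absurd h.1 (by omega))]
      · by_cases h4 : move = "bottom"
        · subst h4
          have hx := hB rfl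
          refine ⟨?_, ?_⟩
          · rw [pvStepA, if_neg (fun h => by simp at h), if_neg (fun h => by simp at h),
                if_neg (fun h => by simp at h), if_neg (fun h => absurd h.2.1 (by omega))]
          · rw [pvStepB, show PySem.Dict.get? pvDeltas "bottom" = some ((1 : Int), (0 : Int)) from by decide]
            dsimp only
            rw [if_neg (fun h => absurd h.2.1 (by omega))]
        · refine ⟨?_, ?_⟩
          · rw [pvStepA, if_neg (fun h => h1 h.1), if_neg (fun h => h2 h.1),
                if_neg (fun h => h3 h.1), if_neg (fun h => h4 h.1)]
          · rw [pvStepB, show PySem.Dict.get? pvDeltas move = none from by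
                simp [pvDeltas, PySem.Dict.get?_insert, h1, h2, h3, h4, PySem.Dict.get?_empty]]

-- B's candidate cell stays on the board
theorem pvStepB_bounds (grid : List (List Int)) (n m : Int) (move : String) (x y : Int)
    (seen : PySem.Set (Int × Int))
    (hx0 : 0 ≤ x) (hxn : x < n) (hy0 : 0 ≤ y) (hym : y < m) :
    0 ≤ (pvStepB grid n m move x y seen).1 ∧ (pvStepB grid n m move x y seen).1 < n ∧
    0 ≤ (pvStepB grid n m move x y seen).2 ∧ (pvStepB grid n m move x y seen).2 < m := by
  rw [pvStepB]
  cases PySem.Dict.get? pvDeltas move with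
  | none => exact ⟨hx0, hxn, hy0, hym⟩
  | some d =>
    dsimp only
    split_ifs with h
    · exact ⟨h.1, h.2.1, h.2.2.1, h.2.2.2.1⟩
    · exact ⟨hx0, hxn, hy0, hym⟩

-- fitness is a pure accumulator of A's loop
theorem pvLoopA_shift (grid : List (List Int)) (end_ : Int × Int) (n m : Int)
    (moves : List String) :
    ∀ (x y : Int) (visited : PySem.Set (Int × Int)) (fitness : Int),
    pvLoopA grid end_ n m moves x y visited fitness
      = fitness + pvLoopA grid end_ n m moves x y visited 0 := by
  induction moves with
  | nil => intro x y visited fitness; simp [pvLoopA]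
  | cons move rest ih =>
    intro x y visited fitness
    rw [pvLoopA, pvLoopA]
    split_ifs with hp
    · omega
    · rw [ih _ _ _ (fitness + _ + _), ih _ _ _ (0 + _ + _)]
      omega

-- the weighted sum distributes over the accumulator
theorem pvSumRuns_append (end_ : Int × Int) (r s : List ((Int × Int) × Int)) :
    pvSumRuns end_ (r ++ s) = pvSumRuns end_ r + pvSumRuns end_ s := by
  induction r with
  | nil => simp [pvSumRuns]
  | cons p r ih => obtain ⟨q, c⟩ := p; rw [List.cons_append, pvSumRuns, pvSumRuns, ih]; omega

-- the weighted sum of the pending run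
theorem pvSumRuns_pending (end_ : Int × Int) (pos : Int × Int) (cnt : Int) (h : 0 ≤ cnt) :
    pvSumRuns end_ (if cnt ≠ 0 then [(pos, cnt)] else [])
      = (|pos.1 - end_.1| + |pos.2 - end_.2|) * cnt := by
  split_ifs with hc
  · rw [pvSumRuns, pvSumRuns]; omega
  · rw [pvSumRuns]; push_neg at hc; rw [hc]; ring

-- invariant: A's remaining fitness equals the weighted sum of B's remaining runs
-- minus what is already accounted for (the accumulator and the open run)
theorem pvRuns_loop (grid : List (List Int)) (end_ : Int × Int) (n m : Int)
    (moves : List String) :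
    ∀ (pos : Int × Int) (seen : PySem.Set (Int × Int)) (cnt : Int)
      (runs : List ((Int × Int) × Int)),
    0 ≤ cnt → 0 ≤ pos.1 → pos.1 < n → 0 ≤ pos.2 → pos.2 < m →
    pvSumRuns end_ (pvRunsB grid end_ n m moves pos seen cnt runs)
      = pvSumRuns end_ runs + (|pos.1 - end_.1| + |pos.2 - end_.2|) * cnt
        + pvLoopA grid end_ n m moves pos.1 pos.2 seen 0 := by
  induction moves with
  | nil =>
    intro pos seen cnt runs hc _ _ _ _
    rw [pvRunsB, pvLoopA, pvSumRuns_append, pvSumRuns_pending end_ pos cnt hc]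
    ring
  | cons move rest ih =>
    intro pos seen cnt runs hc h1 h2 h3 h4
    rw [pvRunsB, pvLoopA]
    rw [pvStep_eq grid n m move pos.1 pos.2 seen h1 h2 h3 h4]
    have hb := pvStepB_bounds grid n m move pos.1 pos.2 seen h1 h2 h3 h4
    set nxt := pvStepB grid n m move pos.1 pos.2 seen with hnxt
    by_cases hmove : nxt ≠ pos
    · simp only [if_pos hmove]
      by_cases hend : nxt = end_
      · simp only [if_pos hend]
        rw [pvSumRuns_append, pvSumRuns_append, pvSumRuns_pending end_ pos cnt hc,
            pvSumRuns_pending end_ nxt 1 (by omega)]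
        ring
      · simp only [if_neg hend]
        rw [pvLoopA_shift grid end_ n m rest nxt.1 nxt.2 (PySem.Set.add seen nxt)
              (0 + |nxt.1 - end_.1| + |nxt.2 - end_.2|),
            ih nxt (PySem.Set.add seen nxt) 1 _ (by omega) hb.1 hb.2.1 hb.2.2.1 hb.2.2.2,
            pvSumRuns_append, pvSumRuns_pending end_ pos cnt hc]
        ring
    · rw [not_not] at hmove
      simp only [hmove, if_neg (show ¬(pos ≠ pos) from fun h => h rfl)]
      by_cases hend : pos = end_
      · simp only [if_pos hend]
        rw [pvSumRuns_append, pvSumRuns_pending end_ pos (cnt + 1) (by omega)]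
        ring
      · simp only [if_neg hend]
        rw [pvLoopA_shift grid end_ n m rest pos.1 pos.2 (PySem.Set.add seen pos)
              (0 + |pos.1 - end_.1| + |pos.2 - end_.2|),
            ih pos (PySem.Set.add seen pos) (cnt + 1) runs (by omega) h1 h2 h3 h4]
        ring

-- the dead case: no recognized move can ever fire, so the position never changes
theorem pvRuns_loop_dead (grid : List (List Int)) (end_ : Int × Int) (n m : Int)
    (moves : List String) (x y : Int)
    (hL : "left" ∈ moves → y ≤ 0) (hR : "right" ∈ moves → m - 1 ≤ y)
    (hT : "top" ∈ moves → x ≤ 0) (hB : "bottom" ∈ moves → n - 1 ≤ x) :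
    ∀ (seen : PySem.Set (Int × Int)) (cnt : Int) (runs : List ((Int × Int) × Int)),
    0 ≤ cnt →
    pvSumRuns end_ (pvRunsB grid end_ n m moves (x, y) seen cnt runs)
      = pvSumRuns end_ runs + (|x - end_.1| + |y - end_.2|) * cnt
        + pvLoopA grid end_ n m moves x y seen 0 := by
  induction moves with
  | nil =>
    intro seen cnt runs hc
    rw [pvRunsB, pvLoopA, pvSumRuns_append, pvSumRuns_pending end_ (x, y) cnt hc]
    try dsimp only
    ring
  | cons move rest ih =>
    intro seen cnt runs hc
    obtain ⟨hA, hB'⟩ := pvStep_eq_dead grid n m move x y seen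
      (fun h => hL (h ▸ List.mem_cons_self ..)) (fun h => hR (h ▸ List.mem_cons_self ..))
      (fun h => hT (h ▸ List.mem_cons_self ..)) (fun h => hB (h ▸ List.mem_cons_self ..))
    rw [pvRunsB, pvLoopA]
    dsimp only
    rw [hA, hB']
    simp only [if_neg (not_not_intro rfl)]
    by_cases hend : ((x, y) : Int × Int) = end_
    · rw [if_pos hend, if_pos hend, pvSumRuns_append,
          pvSumRuns_pending end_ (x, y) (cnt + 1) (by omega)]
      try dsimp only
      ring
    · rw [if_neg hend, if_neg hend]
      rw [pvLoopA_shift grid end_ n m rest x y (PySem.Set.add seen (x, y))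
            (0 + |x - end_.1| + |y - end_.2|),
          ih (fun h => hL (List.mem_cons_of_mem _ h)) (fun h => hR (List.mem_cons_of_mem _ h))
            (fun h => hT (List.mem_cons_of_mem _ h)) (fun h => hB (List.mem_cons_of_mem _ h))
            (PySem.Set.add seen (x, y)) (cnt + 1) runs (by omega)]
      try dsimp only
      ring

-- ===== VERDICT (by name: the statement is the Claim_ definition above) =====
theorem evaluate_spec : Claim_equal_evaluate := by
  intro individual grid start end_ n m _ hpre
  show _ = pvSumRuns end_ (pvRunsB grid end_ n m individual start PySem.Set.empty 0 [])
  rcases hpre with ⟨hs1, hs2, hs3, hs4, _, _⟩ | ⟨hL, hR, hT, hB⟩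
  · have := pvRuns_loop grid end_ n m individual start PySem.Set.empty 0 []
      le_rfl hs1 hs2 hs3 hs4
    rw [this, pvSumRuns]
    show evaluate individual grid start end_ n m = 0 + _ * 0 + _
    rw [evaluate]
    ring
  · have := pvRuns_loop_dead grid end_ n m individual start.1 start.2
      (fun h => (hL.resolve_left (not_not_intro h))) (fun h => (hR.resolve_left (not_not_intro h)))
      (fun h => (hT.resolve_left (not_not_intro h))) (fun h => (hB.resolve_left (not_not_intro h)))
      PySem.Set.empty 0 [] le_rfl
    rw [Prod.mk.eta] at this
    rw [this, pvSumRuns]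
    show evaluate individual grid start end_ n m = 0 + _ * 0 + _
    rw [evaluate]
    ring
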